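-- pv_equiv track=rewrite | github.com/BIGJRA/AdventOfCode2023 | 2023_03.py | solve
-- ===== SOURCE A (Python) =====
-- from dataclasses import dataclass
-- from functools import lru_cache
--
-- def solve(data, p):
--     lines = data.splitlines()
--
--     @dataclass
--     class Number:
--         text: str
--         row: int
--         col: int
--         active: bool
--
--         def __key(self):
--             return self.row, self.col
--
--         def __hash__(self):
--             return hash(self.__key())
--
--         def addChar(self, char):
--             self.text += char
--
--         def getAdj(self):
--             ans = [(self.row, self.col - 1), (self.row, self.col + len(self.text))]
--             for j in range(self.col - 1, self.col + len(self.text) + 1):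
--                 ans.append((self.row - 1, j))
--                 ans.append((self.row + 1, j))
--             return ans
--
--     @dataclass
--     class Symbol:
--         text: str
--         row: int
--         col: int
--         adjacent_nums: list
--
--         def __key(self):
--             return self.row, self.col
--
--         def __hash__(self):
--             return hash(self.__key())
--
--     @lru_cache
--     def issymbol(s: str) -> bool:
--         return not s.isdigit() and not s == "."
--
--     symbols = set([])
--     nums = set([])
--     is_number = False
--     n = None
--     for i, line in enumerate(lines):
--         for j, char in enumerate(line):
--             if not is_number:
--                 if char.isdigit():
--                     is_number = True
--                     n = Number(text=char, row=i, col=j, active=False)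
--             else:
--                 if char.isdigit():
--                     n.addChar(char)
--                 else:
--                     nums.add(n)
--                     is_number = False
--             if issymbol(char):
--                 symbols.add(Symbol(text=char, row=i, col=j, adjacent_nums=list()))
--         if is_number:
--             nums.add(n)
--
--     for s in symbols:
--         for n in nums:
--             if (s.row, s.col) in n.getAdj():
--                 n.active = True
--                 s.adjacent_nums.append(int(n.text))
--
--     total = 0
--     if p == 1:
--         for n in nums:
--             if n.active:
--                 total += int(n.text)
--     elif p == 2:
--         for s in symbols:
--             if s.text == "*" and len(s.adjacent_nums) == 2:
--                 total += s.adjacent_nums[0] * s.adjacent_nums[1]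
--     return total
-- ===== SOURCE B (Python) =====
-- def solve(data, p):
--     lines = data.splitlines()
--     # the schematic as a stream of cells in reading order
--     cells = [(i, j, ch) for i, line in enumerate(lines) for j, ch in enumerate(line)]
--
--     nums = []   # (row, col, length, value) -- row/col of the run's first digit
--     syms = []   # (row, col, char)
--     run = None  # (row, col, digits) of the digit run being read
--     for i, j, ch in cells:
--         if ch.isdigit():
--             run = (i, j, ch) if run is None else (run[0], run[1], run[2] + ch)
--         else:
--             if run is not None:
--                 nums.append((run[0], run[1], len(run[2]), int(run[2])))
--                 run = None
--             if ch != '.':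
--                 syms.append((i, j, ch))
--     if run is not None:
--         nums.append((run[0], run[1], len(run[2]), int(run[2])))
--
--     def adj(r, c, row, col, length):
--         if r == row:
--             return c == col - 1 or c == col + length
--         return abs(r - row) == 1 and col - 1 <= c <= col + length
--
--     total = 0
--     if p == 1:
--         # index symbol columns by row; each number probes only its three rows
--         byrow = {}
--         for (r, c, ch) in syms:
--             byrow.setdefault(r, []).append(c)
--         for (row, col, length, v) in nums:
--             if any(adj(r, c, row, col, length)
--                    for r in (row - 1, row, row + 1)
--                    for c in byrow.get(r, [])):
--                 total += v
--     elif p == 2: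
--         # index numbers by row; each '*' probes only its three rows
--         byrow = {}
--         for (row, col, length, v) in nums:
--             byrow.setdefault(row, []).append((col, length, v))
--         for (r, c, ch) in syms:
--             if ch == '*':
--                 vals = [v for row in (r - 1, r, r + 1)
--                         for (col, length, v) in byrow.get(row, [])
--                         if adj(r, c, row, col, length)]
--                 if len(vals) == 2:
--                     total += vals[0] * vals[1]
--     return total
-- ===== Notes on version B (the rewrite author's own statement) =====
-- stated objective: faster
-- what changed: Replaces the nested symbols x numbers scan (which builds each number's adjacency list and tests membership in it) with by-row hash indexes and an O(1) arithmetic adjacency test, so each symbol/number probes only the entries of its three neighbouring rows; the schematic is parsed as one stream of cells grouped into digit runs and symbols.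
import Mathlib
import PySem

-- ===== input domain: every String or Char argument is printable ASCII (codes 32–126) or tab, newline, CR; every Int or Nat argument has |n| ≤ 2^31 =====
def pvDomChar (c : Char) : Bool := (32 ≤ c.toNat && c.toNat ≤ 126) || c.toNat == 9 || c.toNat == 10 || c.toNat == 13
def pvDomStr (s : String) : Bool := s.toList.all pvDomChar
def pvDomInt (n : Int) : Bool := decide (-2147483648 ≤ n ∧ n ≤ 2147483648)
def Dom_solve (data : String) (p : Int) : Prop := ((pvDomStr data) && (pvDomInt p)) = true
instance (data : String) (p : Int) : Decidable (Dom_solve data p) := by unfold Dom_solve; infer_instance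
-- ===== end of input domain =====

-- B replaces A's nested symbols × numbers scan (each testing membership in a freshly
-- built adjacency list) by a by-row index with an arithmetic adjacency test, parsing the
-- schematic as one stream of cells grouped into digit runs and symbols.

-- ===== PORT A =====

structure ANum where
  text : List Char
  row : Int
  col : Int
  active : Bool
deriving DecidableEq, Repr

structure ASym where
  text : Char
  row : Int
  col : Int
  adj : List Int
deriving DecidableEq, Repr

def aIsSymbol (c : Char) : Bool := !c.isDigit && !(c == '.')

-- Python `nums.add(n)`: a set of MUTABLE Number objects hashed by (row, col); the only
-- re-added object is the aliased previously stored one, so the stored entry with the same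
-- key takes n's current fields, and a fresh key is appended.
def aNumsAdd (nums : List ANum) (n : ANum) : List ANum :=
  if nums.any (fun m => m.row == n.row && m.col == n.col) then
    nums.map (fun m => if m.row == n.row && m.col == n.col then n else m)
  else nums ++ [n]

-- Python `symbols.add(s)`: distinct (row, col) keys, so equal-element dedup appends.
def aSymsAdd (syms : List ASym) (s : ASym) : List ASym :=
  if syms.any (fun t => t == s) then syms else syms ++ [s]

def aChar (i : Int) (st : List ASym × List ANum × Bool × Option ANum) (jc : Int × Char) :
    List ASym × List ANum × Bool × Option ANum :=
  let (syms, nums, isN, cur) := st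
  let (j, c) := jc
  let (nums, isN, cur) :=
    if !isN then
      if c.isDigit then (nums, true, some ⟨[c], i, j, false⟩)
      else (nums, isN, cur)
    else
      if c.isDigit then (nums, isN, cur.map (fun n => { n with text := n.text ++ [c] }))
      else ((match cur with | some n => aNumsAdd nums n | none => nums), false, cur)
  let syms := if aIsSymbol c then aSymsAdd syms ⟨c, i, j, []⟩ else syms
  (syms, nums, isN, cur)

def aLine (st : List ASym × List ANum × Bool × Option ANum) (il : Int × String) :
    List ASym × List ANum × Bool × Option ANum :=
  let st := (PySem.List.enumerate il.2.toList 0).foldl (aChar il.1) st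
  let (syms, nums, isN, cur) := st
  let nums := if isN then (match cur with | some n => aNumsAdd nums n | none => nums) else nums
  (syms, nums, isN, cur)

def aGetAdj (n : ANum) : List (Int × Int) :=
  (PySem.List.pyRange (n.col - 1) (n.col + (n.text.length : Int) + 1)).foldl
    (fun acc j => acc ++ [(n.row - 1, j), (n.row + 1, j)])
    [(n.row, n.col - 1), (n.row, n.col + (n.text.length : Int))]

-- the inner `for n in nums` of A's marking loop (n.active := True; s.adjacent_nums.append)
def aMark (nums : List ANum) (s : ASym) : List ANum × ASym :=
  nums.foldl (fun acc n =>
    if (s.row, s.col) ∈ aGetAdj n then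
      (acc.1 ++ [{ n with active := true }],
       { acc.2 with adj := acc.2.adj ++ [(PySem.Int.ofChars? n.text).getD 0] })
    else (acc.1 ++ [n], acc.2)) ([], s)

def solve (data : String) (p : Int) : Int :=
  let lines := PySem.Str.splitlines data
  let st := (PySem.List.enumerate lines 0).foldl aLine ([], [], false, none)
  let symbols0 := st.1
  let nums0 := st.2.1
  let r := symbols0.foldl (fun acc s => let m := aMark acc.1 s; (m.1, acc.2 ++ [m.2]))
    (nums0, ([] : List ASym))
  let nums := r.1
  let symbols := r.2
  if p == 1 then
    nums.foldl (fun t n => if n.active then t + (PySem.Int.ofChars? n.text).getD 0 else t) 0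
  else if p == 2 then
    symbols.foldl (fun t s =>
      if s.text == '*' && s.adj.length == 2 then
        t + ((PySem.List.pyGet? s.adj 0).getD 0) * ((PySem.List.pyGet? s.adj 1).getD 0)
      else t) 0
  else 0

-- ===== PORT B =====

abbrev BSt := List (Int × Int × Int × Int) × List (Int × Int × Char) × Option (Int × Int × List Char)

-- `nums.append((run[0], run[1], len(run[2]), int(run[2])))`
def bFlush (bn : List (Int × Int × Int × Int)) (q : Int × Int × List Char) :
    List (Int × Int × Int × Int) :=
  bn ++ [(q.1, q.2.1, (q.2.2.length : Int), (PySem.Int.ofChars? q.2.2).getD 0)]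

-- the body of `for i, j, ch in cells`
def bStep (st : BSt) (cell : Int × Int × Char) : BSt :=
  let (i, j, ch) := cell
  if ch.isDigit then
    match st.2.2 with
    | none => (st.1, st.2.1, some (i, j, [ch]))
    | some (r, c, t) => (st.1, st.2.1, some (r, c, t ++ [ch]))
  else
    let st1 : BSt := match st.2.2 with
      | some q => (bFlush st.1 q, st.2.1, none)
      | none => st
    if !(ch == '.') then (st1.1, st1.2.1 ++ [(i, j, ch)], st1.2.2) else st1

def bAdj (r c row col len : Int) : Bool :=
  if r == row then c == col - 1 || c == col + len
  else decide ((r - row).natAbs = 1) && decide (col - 1 ≤ c) && decide (c ≤ col + len)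

def solve_alt (data : String) (p : Int) : Int :=
  let lines := PySem.Str.splitlines data
  let cells := (PySem.List.enumerate lines 0).flatMap
    (fun il => (PySem.List.enumerate il.2.toList 0).map (fun jc => (il.1, jc.1, jc.2)))
  let st := cells.foldl bStep (([], [], none) : BSt)
  let nums := match st.2.2 with | some q => bFlush st.1 q | none => st.1
  let syms := st.2.1
  if p == 1 then
    let byrow : PySem.Dict Int (List Int) :=
      syms.foldl (fun d s => d.modify s.1 [] (fun l => l ++ [s.2.1])) PySem.Dict.empty
    nums.foldl (fun t q =>
      if [q.1 - 1, q.1, q.1 + 1].any (fun r =>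
          (byrow.getD r []).any (fun c => bAdj r c q.1 q.2.1 q.2.2.1)) then
        t + q.2.2.2
      else t) 0
  else if p == 2 then
    let byrow : PySem.Dict Int (List (Int × Int × Int)) :=
      nums.foldl (fun d q => d.modify q.1 [] (fun l => l ++ [q.2])) PySem.Dict.empty
    syms.foldl (fun t s =>
      if s.2.2 == '*' then
        let vals := [s.1 - 1, s.1, s.1 + 1].foldl (fun a row =>
          (byrow.getD row []).foldl (fun a q =>
            if bAdj s.1 s.2.1 row q.1 q.2.1 then a ++ [q.2.2] else a) a) []
        if vals.length == 2 then
          t + ((PySem.List.pyGet? vals 0).getD 0) * ((PySem.List.pyGet? vals 1).getD 0)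
        else t
      else t) 0
  else 0

-- ===== PRECONDITION & SPEC =====

def Spec_solve (data : String) (p : Int) (out : Int) : Prop := out = solve_alt data p
instance (data : String) (p : Int) (out : Int) : Decidable (Spec_solve data p out) := by
  unfold Spec_solve; infer_instance

-- ===== CLAIM (what is proved, stated in full; the proofs are below) =====
def Claim_equal_solve : Prop :=
  ∀ (data : String) (p : Int), Dom_solve data p → Spec_solve data p (solve data p)

-- ===== LEMMAS AND PROOFS =====

abbrev AState := List ASym × List ANum × Bool × Option ANum

def projN (n : ANum) : Int × Int × Int × Int :=
  (n.row, n.col, (n.text.length : Int), (PySem.Int.ofChars? n.text).getD 0)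

def projS (s : ASym) : Int × Int × Char := (s.row, s.col, s.text)

-- strict row-major order on grid positions
def pkLt (a b : Int × Int) : Prop := a.1 < b.1 ∨ (a.1 = b.1 ∧ a.2 < b.2)

theorem pkLt_mono {a : Int × Int} {i j j' : Int} (h : pkLt a (i, j)) (hj : j ≤ j') :
    pkLt a (i, j') := by
  rcases h with h | h
  · exact Or.inl h
  · exact Or.inr ⟨h.1, lt_of_lt_of_le h.2 hj⟩

theorem pkLt_next {a : Int × Int} {i j : Int} (h : pkLt a (i, j)) : pkLt a (i + 1, 0) := by
  rcases h with h | h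
  · exact Or.inl (by omega)
  · exact Or.inl (by omega)

theorem pkLt_ne {a b : Int × Int} (h : pkLt a b) : ¬(a.1 = b.1 ∧ a.2 = b.2) := by
  rintro ⟨h1, h2⟩
  rcases h with h | h <;> omega

-- A's end-of-line `if is_number: nums.add(n)` as a function of the state
def endNums (nu : List ANum) (isN : Bool) (cur : Option ANum) : List ANum :=
  if isN then (match cur with | some n => aNumsAdd nu n | none => nu) else nu

-- the simulation invariant between A's per-line object scan and B's cell-stream scan;
-- `ex` tells whether the pending run's copy inside A's nums (if any) is current
def StRel (i j : Int) (ex : Bool) (a : AState) (b : BSt) : Prop :=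
  a.1.map projS = b.2.1 ∧ (∀ s ∈ a.1, s.adj = []) ∧
  (∀ s ∈ b.2.1, pkLt (s.1, s.2.1) (i, j)) ∧
  (∀ n ∈ a.2.1, n.active = false) ∧ (∀ m ∈ b.1, pkLt (m.1, m.2.1) (i, j)) ∧
  (match b.2.2 with
   | none => a.2.2.1 = false ∧ a.2.1.map projN = b.1
   | some (r, c, t) =>
       a.2.2.1 = true ∧ a.2.2.2 = some ⟨t, r, c, false⟩ ∧
       pkLt (r, c) (i, j) ∧ (∀ m ∈ b.1, pkLt (m.1, m.2.1) (r, c)) ∧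
       (if ex then a.2.1.map projN = bFlush b.1 (r, c, t)
        else (a.2.1.map projN = b.1 ∨ ∃ L v, a.2.1.map projN = b.1 ++ [(r, c, L, v)])))

theorem StRel_weaken {i j : Int} {a : AState} {b : BSt} (h : StRel i j true a b) :
    StRel i j false a b := by
  obtain ⟨h1, h2, h3, h4, h5, h6⟩ := h
  refine ⟨h1, h2, h3, h4, h5, ?_⟩
  rcases hp : b.2.2 with _ | ⟨r, c, t⟩
  · rw [hp] at h6; exact h6
  · rw [hp] at h6
    obtain ⟨g1, g2, g3, g4, g5⟩ := h6
    exact ⟨g1, g2, g3, g4, Or.inr ⟨_, _, g5⟩⟩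

theorem aChar_digit_false (i : Int) (sy : List ASym) (nu : List ANum) (cur : Option ANum)
    (j : Int) (c : Char) (hd : c.isDigit = true) :
    aChar i (sy, nu, false, cur) (j, c) = (sy, nu, true, some ⟨[c], i, j, false⟩) := by
  simp [aChar, aIsSymbol, hd]

theorem aChar_nondigit (i : Int) (sy : List ASym) (nu : List ANum) (isN : Bool)
    (cur : Option ANum) (j : Int) (c : Char) (hd : c.isDigit = false) :
    aChar i (sy, nu, isN, cur) (j, c) =
      ((if aIsSymbol c then aSymsAdd sy ⟨c, i, j, []⟩ else sy),
       (if isN then (match cur with | some n => aNumsAdd nu n | none => nu) else nu),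
       false, cur) := by
  cases isN <;> simp [aChar, hd]

theorem aNumsAdd_append (nums : List ANum) (n : ANum)
    (h : ∀ m ∈ nums, ¬(m.row = n.row ∧ m.col = n.col)) :
    aNumsAdd nums n = nums ++ [n] := by
  unfold aNumsAdd
  rw [if_neg]
  simp only [List.any_eq_true, Bool.and_eq_true, beq_iff_eq, not_exists]
  intro m
  rintro ⟨hm, h1, h2⟩
  exact h m hm ⟨h1, h2⟩

theorem aNumsAdd_replace (ns : List ANum) (stale n : ANum)
    (h : ∀ m ∈ ns, ¬(m.row = n.row ∧ m.col = n.col))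
    (hr : stale.row = n.row) (hc : stale.col = n.col) :
    aNumsAdd (ns ++ [stale]) n = ns ++ [n] := by
  unfold aNumsAdd
  rw [if_pos]
  · rw [List.map_append]
    congr 1
    · have : ∀ m ∈ ns, (if (m.row == n.row && m.col == n.col) = true then n else m) = id m := by
        intro m hm
        rw [if_neg]
        · rfl
        · simp only [Bool.and_eq_true, beq_iff_eq]
          intro hcon
          exact h m hm ⟨hcon.1, hcon.2⟩
      rw [List.map_congr_left this, List.map_id]
    · simp [hr, hc]
  · simp only [List.any_eq_true]
    exact ⟨stale, by simp, by simp [hr, hc]⟩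

theorem aSymsAdd_append (syms : List ASym) (s : ASym) (h : ∀ t ∈ syms, ¬t = s) :
    aSymsAdd syms s = syms ++ [s] := by
  unfold aSymsAdd
  rw [if_neg]
  simp only [List.any_eq_true, beq_iff_eq, not_exists]
  intro t
  rintro ⟨ht, he⟩
  exact h t ht he

theorem aChar_digit_true (i : Int) (sy : List ASym) (nu : List ANum) (n : ANum)
    (j : Int) (c : Char) (hd : c.isDigit = true) :
    aChar i (sy, nu, true, some n) (j, c)
      = (sy, nu, true, some { n with text := n.text ++ [c] }) := by
  simp [aChar, aIsSymbol, hd]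

theorem mem_key_of_projS {sy : List ASym} {bs : List (Int × Int × Char)}
    (h : sy.map projS = bs) {P : Int × Int → Prop}
    (hk : ∀ s ∈ bs, P (s.1, s.2.1)) : ∀ t ∈ sy, P (t.row, t.col) := by
  intro t ht
  have : projS t ∈ bs := h ▸ List.mem_map_of_mem ht
  exact hk _ this

-- symbol recording: both sides append the same entry (or nothing) for a non-digit char
theorem symsStep (i j : Int) (sy : List ASym) (bs : List (Int × Int × Char)) (ch : Char)
    (hmap : sy.map projS = bs) (hkey : ∀ s ∈ bs, pkLt (s.1, s.2.1) (i, j))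
    (hadj : ∀ s ∈ sy, s.adj = []) (hd : ch.isDigit = false) :
    ((if aIsSymbol ch then aSymsAdd sy ⟨ch, i, j, []⟩ else sy).map projS
       = (if !(ch == '.') then bs ++ [(i, j, ch)] else bs)) ∧
    (∀ s ∈ (if aIsSymbol ch then aSymsAdd sy ⟨ch, i, j, []⟩ else sy), s.adj = []) ∧
    (∀ s ∈ (if !(ch == '.') then bs ++ [(i, j, ch)] else bs), pkLt (s.1, s.2.1) (i, j + 1)) := by
  have hsymEq : aIsSymbol ch = !(ch == '.') := by simp [aIsSymbol, hd]
  have hfresh : ∀ t ∈ sy, ¬t = (⟨ch, i, j, []⟩ : ASym) := by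
    intro t ht hte
    have := mem_key_of_projS (P := fun q => pkLt q (i, j)) hmap hkey t ht
    rw [hte] at this
    exact pkLt_ne this ⟨rfl, rfl⟩
  by_cases hc : (!(ch == '.')) = true
  · have hA : (if aIsSymbol ch then aSymsAdd sy ⟨ch, i, j, []⟩ else sy)
        = aSymsAdd sy ⟨ch, i, j, []⟩ := by rw [hsymEq, if_pos hc]
    have hB : (if !(ch == '.') then bs ++ [(i, j, ch)] else bs) = bs ++ [(i, j, ch)] := if_pos hc
    rw [hA, hB, aSymsAdd_append sy _ hfresh]
    refine ⟨by rw [List.map_append, hmap]; rfl, ?_, ?_⟩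
    · intro s hs
      rcases List.mem_append.mp hs with h' | h'
      · exact hadj s h'
      · simp at h'; subst h'; rfl
    · intro s hs
      rcases List.mem_append.mp hs with h' | h'
      · exact pkLt_mono (hkey s h') (by omega)
      · simp at h'; subst h'; exact Or.inr ⟨rfl, by dsimp only; omega⟩
  · have hA : (if aIsSymbol ch then aSymsAdd sy ⟨ch, i, j, []⟩ else sy) = sy := by
      rw [hsymEq, if_neg hc]
    have hB : (if !(ch == '.') then bs ++ [(i, j, ch)] else bs) = bs := if_neg hc
    rw [hA, hB]
    exact ⟨hmap, hadj, fun s hs => pkLt_mono (hkey s hs) (by omega)⟩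

-- closing a run: A's set re-add equals B's flush (stale copy replaced, fresh key appended)
theorem flush_sim {nu : List ANum} {bn : List (Int × Int × Int × Int)} {r c : Int}
    {t : List Char}
    (hmap : nu.map projN = bn ∨ ∃ L v, nu.map projN = bn ++ [(r, c, L, v)])
    (hkeys : ∀ m ∈ bn, pkLt (m.1, m.2.1) (r, c))
    (hact : ∀ m ∈ nu, m.active = false) :
    (aNumsAdd nu ⟨t, r, c, false⟩).map projN = bFlush bn (r, c, t) ∧
      (∀ m ∈ aNumsAdd nu ⟨t, r, c, false⟩, m.active = false) := by
  have hkey' : ∀ m ∈ nu, projN m ∈ bn → ¬(m.row = r ∧ m.col = c) := by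
    intro m _ hmem hcon
    have := hkeys _ hmem
    rw [pkLt] at this
    simp [projN, hcon.1, hcon.2] at this
  rcases hmap with hm | ⟨L, v, hm⟩
  · have hfresh : ∀ m ∈ nu, ¬(m.row = (⟨t, r, c, false⟩ : ANum).row ∧ m.col = (⟨t, r, c, false⟩ : ANum).col) := by
      intro m hmem
      exact hkey' m hmem (hm ▸ List.mem_map_of_mem hmem)
    rw [aNumsAdd_append nu _ hfresh]
    refine ⟨?_, ?_⟩
    · rw [List.map_append, hm]
      rfl
    · intro m hmem
      rcases List.mem_append.mp hmem with h' | h'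
      · exact hact m h'
      · simp at h'; subst h'; rfl
  · obtain ⟨ys, zs, hnu, hys, hzs⟩ := List.map_eq_append_iff.mp hm
    obtain ⟨stale, hz⟩ : ∃ stale, zs = [stale] := by
      cases zs with
      | nil => simp at hzs
      | cons z zt =>
        cases zt with
        | nil => exact ⟨z, rfl⟩
        | cons _ _ => simp at hzs
    subst hz hnu
    simp only [List.map_cons, List.map_nil, List.cons.injEq] at hzs
    have hsr : stale.row = r := by
      have := hzs.1; simp [projN, Prod.ext_iff] at this; exact this.1
    have hsc : stale.col = c := by
      have := hzs.1; simp [projN, Prod.ext_iff] at this; exact this.2.1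
    have hfresh : ∀ m ∈ ys, ¬(m.row = (⟨t, r, c, false⟩ : ANum).row ∧ m.col = (⟨t, r, c, false⟩ : ANum).col) := by
      intro m hmem
      exact hkey' m (List.mem_append.mpr (Or.inl hmem)) (hys ▸ List.mem_map_of_mem hmem)
    rw [aNumsAdd_replace ys stale _ hfresh hsr hsc]
    refine ⟨?_, ?_⟩
    · rw [List.map_append, hys]
      rfl
    · intro m hmem
      rcases List.mem_append.mp hmem with h' | h'
      · exact hact m (List.mem_append.mpr (Or.inl h'))
      · simp at h'; subst h'; rfl

-- one character: A's state machine and B's stream step stay in simulation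
theorem stepChar (i j : Int) (c : Char) (a : AState) (b : BSt)
    (h : StRel i j false a b) :
    StRel i (j + 1) false (aChar i a (j, c)) (bStep b (i, j, c)) := by
  obtain ⟨sy, nu, isN, cur⟩ := a
  obtain ⟨bn, bs, run⟩ := b
  obtain ⟨h1, h2, h3, h4, h5, h6⟩ := h
  dsimp only at h1 h2 h3 h4 h5
  by_cases hd : c.isDigit = true
  · rcases run with _ | ⟨r, c0, t⟩
    · obtain ⟨hisN, hmap⟩ := h6
      dsimp only at hisN hmap
      subst hisN
      rw [aChar_digit_false i sy nu cur j c hd]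
      have hB : bStep (bn, bs, none) (i, j, c) = (bn, bs, some (i, j, [c])) := by
        simp [bStep, hd]
      rw [hB]
      refine ⟨h1, h2, ?_, h4, ?_, ?_⟩
      · intro s hs; exact pkLt_mono (h3 s hs) (by omega)
      · intro m hm; exact pkLt_mono (h5 m hm) (by omega)
      · exact ⟨rfl, rfl, Or.inr ⟨rfl, by dsimp only; omega⟩, h5, Or.inl hmap⟩
    · obtain ⟨hisN, hcur, hkey, hkeys, hor⟩ := h6
      dsimp only at hisN hcur
      subst hisN
      rw [hcur, aChar_digit_true i sy nu _ j c hd]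
      have hB : bStep (bn, bs, some (r, c0, t)) (i, j, c) = (bn, bs, some (r, c0, t ++ [c])) := by
        simp [bStep, hd]
      rw [hB]
      refine ⟨h1, h2, ?_, h4, ?_, ?_⟩
      · intro s hs; exact pkLt_mono (h3 s hs) (by omega)
      · intro m hm; exact pkLt_mono (h5 m hm) (by omega)
      · exact ⟨rfl, rfl, pkLt_mono hkey (by omega), hkeys, hor⟩
  · have hd' : c.isDigit = false := by simpa using hd
    rcases run with _ | ⟨r, c0, t⟩
    · obtain ⟨hisN, hmap⟩ := h6
      dsimp only at hisN hmap
      subst hisN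
      rw [aChar_nondigit i sy nu false cur j c hd']
      simp only [if_neg (by simp : ¬ false = true)]
      obtain ⟨hs1, hs2, hs3⟩ := symsStep i j sy bs c h1 h3 h2 hd'
      have hB : bStep (bn, bs, none) (i, j, c)
          = (bn, if !(c == '.') then bs ++ [(i, j, c)] else bs, none) := by
        by_cases hdot : (!(c == '.')) = true <;> simp [bStep, hd', hdot]
      rw [hB]
      exact ⟨hs1, hs2, hs3, h4, fun m hm => pkLt_mono (h5 m hm) (by omega), rfl, hmap⟩
    · obtain ⟨hisN, hcur, hkey, hkeys, hor⟩ := h6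
      dsimp only at hisN hcur h4
      subst hisN
      rw [aChar_nondigit i sy nu true cur j c hd', hcur]
      obtain ⟨hflush, hact⟩ := flush_sim (t := t) hor hkeys h4
      obtain ⟨hs1, hs2, hs3⟩ := symsStep i j sy bs c h1 h3 h2 hd'
      have hB : bStep (bn, bs, some (r, c0, t)) (i, j, c)
          = (bFlush bn (r, c0, t), if !(c == '.') then bs ++ [(i, j, c)] else bs, none) := by
        by_cases hdot : (!(c == '.')) = true <;> simp [bStep, hd', hdot]
      rw [hB]
      refine ⟨hs1, hs2, hs3, hact, ?_, rfl, hflush⟩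
      intro m hm
      rw [bFlush] at hm
      rcases List.mem_append.mp hm with h' | h'
      · exact pkLt_mono (h5 m h') (by omega)
      · simp at h'
        subst h'
        exact pkLt_mono hkey (by omega)

-- the characters of one line, in step
theorem innerFold (i : Int) : ∀ (cs : List Char) (j : Int) (a : AState) (b : BSt),
    StRel i j false a b →
    StRel i (j + cs.length) false
      ((PySem.List.enumerate cs j).foldl (aChar i) a)
      ((PySem.List.enumerate cs j).foldl (fun st jc => bStep st (i, jc.1, jc.2)) b) := by
  intro cs
  induction cs with
  | nil =>
    intro j a b h
    simpa [PySem.List.enumerate] using h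
  | cons c cs ih =>
    intro j a b h
    rw [PySem.List.enumerate_cons, List.foldl_cons, List.foldl_cons]
    have hrec := ih (j + 1) _ _ (stepChar i j c a b h)
    have hc : j + ((c :: cs).length : Int) = (j + 1) + (cs.length : Int) := by
      simp [List.length_cons]
      ring
    rw [hc]
    exact hrec

-- one full line including A's end-of-line add
theorem lineStep (i : Int) (l : String) (a : AState) (b : BSt) (h : StRel i 0 true a b) :
    StRel (i + 1) 0 true (aLine a (i, l))
      ((PySem.List.enumerate l.toList 0).foldl (fun st jc => bStep st (i, jc.1, jc.2)) b) := by
  have hin := innerFold i l.toList 0 a b (StRel_weaken h)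
  rw [zero_add] at hin
  rcases hF : (PySem.List.enumerate l.toList 0).foldl (aChar i) a with ⟨sy', nu', isN', cur'⟩
  rcases hG : (PySem.List.enumerate l.toList 0).foldl (fun st jc => bStep st (i, jc.1, jc.2)) b
    with ⟨bn', bs', run'⟩
  rw [hF, hG] at hin
  obtain ⟨sy, nu, isN, cur⟩ := a
  have hALine : aLine (sy, nu, isN, cur) (i, l) = (sy', endNums nu' isN' cur', isN', cur') := by
    unfold aLine endNums
    simp only [hF]
  rw [hALine, hG]
  obtain ⟨h1, h2, h3, h4, h5, h6⟩ := hin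
  dsimp only at h1 h2 h3 h4 h5
  rcases run' with _ | ⟨r, c0, t⟩
  · obtain ⟨hisN, hmap⟩ := h6
    dsimp only at hisN hmap
    subst hisN
    have he : endNums nu' false cur' = nu' := rfl
    rw [he]
    refine ⟨h1, h2, ?_, h4, ?_, rfl, hmap⟩
    · intro s hs; exact pkLt_next (h3 s hs)
    · intro m hm; exact pkLt_next (h5 m hm)
  · obtain ⟨hisN, hcur, hkey, hkeys, hor⟩ := h6
    dsimp only at hisN hcur h4
    subst hisN
    obtain ⟨hflush, hact⟩ := flush_sim (t := t) hor hkeys h4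
    have he : endNums nu' true cur' = aNumsAdd nu' ⟨t, r, c0, false⟩ := by
      unfold endNums
      rw [hcur]
      rfl
    rw [he]
    refine ⟨h1, h2, ?_, hact, ?_, rfl, hcur, pkLt_next hkey, hkeys, hflush⟩
    · intro s hs; exact pkLt_next (h3 s hs)
    · intro m hm; exact pkLt_next (h5 m hm)

theorem outerFold (ls : List String) : ∀ (i : Int) (a : AState) (b : BSt),
    StRel i 0 true a b →
    StRel (i + ls.length) 0 true
      ((PySem.List.enumerate ls i).foldl aLine a)
      ((PySem.List.enumerate ls i).foldl
        (fun st il => ((PySem.List.enumerate il.2.toList 0).map (fun jc => (il.1, jc.1, jc.2))).foldl bStep st) b) := by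
  induction ls with
  | nil =>
    intro i a b h
    simpa [PySem.List.enumerate] using h
  | cons l ls ih =>
    intro i a b h
    rw [PySem.List.enumerate_cons, List.foldl_cons, List.foldl_cons]
    have hline := lineStep i l a b h
    rw [List.foldl_map]
    have hrec := ih (i + 1) _ _ hline
    have hc : i + ((l :: ls).length : Int) = (i + 1) + (ls.length : Int) := by
      simp [List.length_cons]
      ring
    rw [hc]
    exact hrec

theorem foldl_flatMap {α β γ : Type} (l : List α) (g : α → List β) (f : γ → β → γ) (b : γ) :
    (l.flatMap g).foldl f b = l.foldl (fun acc x => (g x).foldl f acc) b := by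
  induction l generalizing b with
  | nil => rfl
  | cons x xs ih =>
    rw [List.flatMap_cons, List.foldl_append, List.foldl_cons]
    exact ih _

-- ---- phase 2 (marking) and the final sums: A's quadratic pass = B's indexed pass ----

theorem bool_eq_of_iff {a b : Bool} (h : a = true ↔ b = true) : a = b := by
  cases a <;> cases b <;> simp_all

theorem mem_aGetAdj (n : ANum) (r c : Int) :
    ((r, c) ∈ aGetAdj n) ↔ bAdj r c n.row n.col (n.text.length : Int) = true := by
  unfold aGetAdj bAdj
  rw [PySem.List.foldl_append_eq_flatMap]
  by_cases hr : r = n.row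
  · subst hr
    simp [List.mem_flatMap, PySem.List.mem_pyRange_one, Prod.ext_iff]
    omega
  · simp [List.mem_flatMap, PySem.List.mem_pyRange_one, Prod.ext_iff, hr]
    constructor
    · rintro ⟨j, hj, (⟨h1, rfl⟩ | ⟨h1, rfl⟩)⟩ <;> refine ⟨⟨?_, ?_⟩, ?_⟩ <;> omega
    · rintro ⟨⟨h1, h2⟩, h3⟩
      exact ⟨c, ⟨by omega, by omega⟩, by omega⟩

def markA (s : ASym) (n : ANum) : ANum :=
  if (s.row, s.col) ∈ aGetAdj n then { n with active := true } else n

theorem markA_text (s : ASym) (n : ANum) : (markA s n).text = n.text := by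
  unfold markA; split <;> rfl

theorem markA_getAdj (s' : ASym) (n : ANum) : aGetAdj (markA s' n) = aGetAdj n := by
  unfold markA; split <;> rfl

theorem aMark_fold (s : ASym) : ∀ (nums : List ANum) (acc1 : List ANum) (s0 : ASym),
    nums.foldl (fun acc n =>
      if (s.row, s.col) ∈ aGetAdj n then
        (acc.1 ++ [{ n with active := true }],
         { acc.2 with adj := acc.2.adj ++ [(PySem.Int.ofChars? n.text).getD 0] })
      else (acc.1 ++ [n], acc.2)) (acc1, s0)
    = (acc1 ++ nums.map (markA s),
       { s0 with adj := s0.adj ++ (nums.filter (fun n => decide ((s.row, s.col) ∈ aGetAdj n))).map (fun n => (PySem.Int.ofChars? n.text).getD 0) }) := by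
  intro nums
  induction nums with
  | nil =>
    intro acc1 s0
    simp
  | cons n ns ih =>
    intro acc1 s0
    by_cases hc : (s.row, s.col) ∈ aGetAdj n
    · rw [List.foldl_cons, if_pos hc, ih]
      simp [markA, hc]
    · rw [List.foldl_cons, if_neg hc, ih]
      simp [markA, hc]

theorem aMark_eq (nums : List ANum) (s : ASym) :
    aMark nums s = (nums.map (markA s),
      { s with adj := s.adj ++ (nums.filter (fun n => decide ((s.row, s.col) ∈ aGetAdj n))).map (fun n => (PySem.Int.ofChars? n.text).getD 0) }) := by
  unfold aMark
  rw [aMark_fold]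
  simp

theorem filter_markA (NA : List ANum) (s s' : ASym) :
    ((NA.map (markA s)).filter (fun n => decide ((s'.row, s'.col) ∈ aGetAdj n))).map (fun n => (PySem.Int.ofChars? n.text).getD 0)
      = (NA.filter (fun n => decide ((s'.row, s'.col) ∈ aGetAdj n))).map (fun n => (PySem.Int.ofChars? n.text).getD 0) := by
  rw [List.filter_map, List.map_map]
  have h1 : ∀ n ∈ NA, ((fun n => decide ((s'.row, s'.col) ∈ aGetAdj n)) ∘ markA s) n =
      (fun n => decide ((s'.row, s'.col) ∈ aGetAdj n)) n := by
    intro n _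
    simp [Function.comp, markA_getAdj]
  rw [List.filter_congr h1]
  apply List.map_congr_left
  intro n _
  simp [Function.comp, markA_text]

theorem phase2 (SA : List ASym) : ∀ (NA : List ANum) (out : List ASym),
    (∀ s ∈ SA, s.adj = []) →
    SA.foldl (fun acc s => let m := aMark acc.1 s; (m.1, acc.2 ++ [m.2])) (NA, out)
      = (NA.map (fun n => { n with active := n.active || SA.any (fun s => decide ((s.row, s.col) ∈ aGetAdj n)) }),
         out ++ SA.map (fun s => { s with adj := (NA.filter (fun n => decide ((s.row, s.col) ∈ aGetAdj n))).map (fun n => (PySem.Int.ofChars? n.text).getD 0) })) := by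
  induction SA with
  | nil =>
    intro NA out _
    simp
  | cons s SA ih =>
    intro NA out hadj
    rw [List.foldl_cons]
    dsimp only
    rw [aMark_eq, ih _ _ (fun t ht => hadj t (List.mem_cons_of_mem _ ht))]
    refine Prod.ext ?_ ?_
    · dsimp only
      rw [List.map_map]
      apply List.map_congr_left
      intro n _
      simp only [Function.comp]
      obtain ⟨tx, rr, cc, ac⟩ := n
      by_cases hc : (s.row, s.col) ∈ aGetAdj ⟨tx, rr, cc, ac⟩
      · simp [markA, hc, List.any_cons]
      · simp [markA, hc, List.any_cons]
    · dsimp only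
      rw [List.map_cons, hadj s (List.mem_cons_self ..)]
      simp only [List.nil_append, List.append_assoc, List.singleton_append]
      congr 1
      congr 1
      apply List.map_congr_left
      intro s' _
      congr 1
      rw [filter_markA]

theorem bAdj_rows {r c row col L : Int} (h : bAdj r c row col L = true) :
    r = row - 1 ∨ r = row ∨ r = row + 1 := by
  unfold bAdj at h
  split at h
  · right; left; exact beq_iff_eq.mp (by assumption)
  · simp only [Bool.and_eq_true, decide_eq_true_eq] at h
    omega

theorem byrowS_getD (syms : List (Int × Int × Char)) (r : Int) :
    ((syms.foldl (fun d s => d.modify s.1 [] (fun l => l ++ [s.2.1])) PySem.Dict.empty).getD r [])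
      = (syms.filter (fun s => s.1 == r)).map (fun s => s.2.1) := by
  have h := PySem.Dict.getD_foldl_modify_append (l := syms.map (fun s => (s.1, s.2.1)))
    (d := (PySem.Dict.empty : PySem.Dict Int (List Int))) (c := r)
  rw [List.foldl_map, List.filter_map, List.map_map] at h
  exact h

theorem byrowN_getD (nums : List (Int × Int × Int × Int)) (r : Int) :
    ((nums.foldl (fun d q => d.modify q.1 [] (fun l => l ++ [q.2])) PySem.Dict.empty).getD r [])
      = (nums.filter (fun q => q.1 == r)).map (fun q => q.2) := by
  exact PySem.Dict.getD_foldl_modify_append nums PySem.Dict.empty r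

theorem anyRows (SB : List (Int × Int × Char)) (row col L : Int) :
    ([row - 1, row, row + 1].any (fun r =>
        ((SB.filter (fun s => s.1 == r)).map (fun s => s.2.1)).any (fun c => bAdj r c row col L)))
      = SB.any (fun s => bAdj s.1 s.2.1 row col L) := by
  apply bool_eq_of_iff
  simp only [List.any_eq_true, List.any_map, List.mem_filter, Function.comp, List.mem_cons,
    List.not_mem_nil, or_false]
  constructor
  · rintro ⟨r, hr, s, ⟨hs, hkey⟩, hadj⟩
    have : s.1 = r := beq_iff_eq.mp hkey
    subst this
    exact ⟨s, hs, hadj⟩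
  · rintro ⟨s, hs, hadj⟩
    refine ⟨s.1, ?_, s, ⟨hs, beq_self_eq_true _⟩, hadj⟩
    rcases bAdj_rows hadj with h | h | h
    · exact Or.inl h
    · exact Or.inr (Or.inl h)
    · exact Or.inr (Or.inr h)

theorem flat_perm {α : Type} (key : α → Int) (P : α → Bool) (v : α → Int) :
    ∀ (rows : List Int), rows.Nodup → ∀ (l : List α), (∀ q ∈ l, P q = true → key q ∈ rows) →
      (rows.flatMap (fun row => (l.filter (fun q => key q == row && P q)).map v)).Perm
        ((l.filter P).map v) := by
  intro rows
  induction rows with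
  | nil =>
    intro _ l hP
    have hnil : l.filter P = [] := List.filter_eq_nil_iff.mpr (fun q hq hPq => by
      simpa using hP q hq hPq)
    simp [hnil]
  | cons row rest ih =>
    intro hnd l hP
    have hnd' : rest.Nodup := (List.nodup_cons.mp hnd).2
    have hrow : row ∉ rest := (List.nodup_cons.mp hnd).1
    rw [List.flatMap_cons]
    have hhead : l.filter (fun q => key q == row && P q)
        = (l.filter P).filter (fun q => key q == row) := by
      rw [List.filter_filter]
    have hbuckets : rest.flatMap (fun row' => (l.filter (fun q => key q == row' && P q)).map v)
        = rest.flatMap (fun row' =>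
            ((l.filter (fun q => !(key q == row))).filter (fun q => key q == row' && P q)).map v) := by
      apply List.flatMap_congr
      intro row' hr'
      congr 1
      rw [List.filter_filter]
      apply List.filter_congr
      intro q _
      by_cases hq : key q = row'
      · have hrr : (row' == row) = false := by
          simp only [beq_eq_false_iff_ne, ne_eq]
          rintro rfl
          exact hrow hr'
        simp [hq, hrr]
      · simp [hq]
    have hside : ∀ q ∈ l.filter (fun q => !(key q == row)), P q = true → key q ∈ rest := by
      intro q hq hPq
      obtain ⟨hql, hqk⟩ := List.mem_filter.mp hq
      have := hP q hql hPq
      simp at hqk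
      rcases List.mem_cons.mp this with h | h
      · exact absurd h hqk
      · exact h
    have ihapp := ih hnd' (l.filter (fun q => !(key q == row))) hside
    have htail : (l.filter (fun q => !(key q == row))).filter P
        = (l.filter P).filter (fun q => !(key q == row)) := List.filter_comm _ _ _
    rw [hhead, hbuckets]
    refine (List.Perm.append_left _ (htail ▸ ihapp)).trans ?_
    rw [← List.map_append]
    exact (List.filter_append_perm _ _).map v

theorem pair_prod (l : List Int) (h : l.length = 2) :
    ((PySem.List.pyGet? l 0).getD 0) * ((PySem.List.pyGet? l 1).getD 0) = l.prod := by
  match l, h with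
  | [a, b], _ => simp [PySem.List.pyGet?, PySem.List.pyIdx?]

theorem rows3_nodup (a : Int) : [a - 1, a, a + 1].Nodup := by
  simp
  omega

theorem valsB_inner (NB : List (Int × Int × Int × Int)) (r c : Int) (a : List Int) (row : Int) :
    ((NB.filter (fun q => q.1 == row)).map (fun q => q.2)).foldl
        (fun a q => if bAdj r c row q.1 q.2.1 then a ++ [q.2.2] else a) a
      = a ++ ((NB.filter (fun q => q.1 == row && bAdj r c q.1 q.2.1 q.2.2.1)).map (fun q => q.2.2.2)) := by
  rw [PySem.List.foldl_append_if (fun (q : Int × Int × Int) => bAdj r c row q.1 q.2.1) (fun (q : Int × Int × Int) => q.2.2)]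
  congr 1
  rw [List.filter_map, List.map_map, List.filter_filter]
  congr 1
  apply List.filter_congr
  intro q _
  by_cases hq : q.1 = row
  · subst hq
    simp [Function.comp]
  · have : (q.1 == row) = false := by simp [hq]
    simp [Function.comp, this]

theorem valsB_perm (NB : List (Int × Int × Int × Int)) (r c : Int) :
    ([r - 1, r, r + 1].foldl (fun a row =>
        (((NB.filter (fun q => q.1 == row)).map (fun q => q.2)).foldl
          (fun a q => if bAdj r c row q.1 q.2.1 then a ++ [q.2.2] else a) a)) []).Perm
      ((NB.filter (fun q => bAdj r c q.1 q.2.1 q.2.2.1)).map (fun q => q.2.2.2)) := by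
  rw [PySem.List.foldl_congr_mem _ _ (fun a row => a ++ ((NB.filter (fun q => q.1 == row && bAdj r c q.1 q.2.1 q.2.2.1)).map (fun q => q.2.2.2))) _ (fun a row _ => valsB_inner NB r c a row)]
  rw [PySem.List.foldl_append_eq_flatMap, List.nil_append]
  exact flat_perm (fun q => q.1) (fun q => bAdj r c q.1 q.2.1 q.2.2.1) (fun q => q.2.2.2)
    [r - 1, r, r + 1] (rows3_nodup r) NB
    (fun q _ hPq => by
      rcases bAdj_rows hPq with h | h | h <;> simp [h])

theorem final_agree (p : Int) (SA : List ASym) (NA : List ANum)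
    (SBl : List (Int × Int × Char)) (NB : List (Int × Int × Int × Int))
    (h1 : SA.map projS = SBl) (h2 : ∀ s ∈ SA, s.adj = []) (h4 : ∀ n ∈ NA, n.active = false)
    (hmap : NA.map projN = NB) :
    (let r := SA.foldl (fun acc s => let m := aMark acc.1 s; (m.1, acc.2 ++ [m.2])) (NA, ([] : List ASym));
     if p == 1 then r.1.foldl (fun t n => if n.active then t + (PySem.Int.ofChars? n.text).getD 0 else t) 0
     else if p == 2 then r.2.foldl (fun t s => if s.text == '*' && s.adj.length == 2 then t + ((PySem.List.pyGet? s.adj 0).getD 0) * ((PySem.List.pyGet? s.adj 1).getD 0) else t) 0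
     else 0)
  = (if p == 1 then
       let byrow : PySem.Dict Int (List Int) := SBl.foldl (fun d s => d.modify s.1 [] (fun l => l ++ [s.2.1])) PySem.Dict.empty;
       NB.foldl (fun t q => if [q.1 - 1, q.1, q.1 + 1].any (fun r => (byrow.getD r []).any (fun c => bAdj r c q.1 q.2.1 q.2.2.1)) then t + q.2.2.2 else t) 0
     else if p == 2 then
       let byrow : PySem.Dict Int (List (Int × Int × Int)) := NB.foldl (fun d q => d.modify q.1 [] (fun l => l ++ [q.2])) PySem.Dict.empty;
       SBl.foldl (fun t s => if s.2.2 == '*' then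
         (let vals := [s.1 - 1, s.1, s.1 + 1].foldl (fun a row => (byrow.getD row []).foldl (fun a q => if bAdj s.1 s.2.1 row q.1 q.2.1 then a ++ [q.2.2] else a) a) [];
          if vals.length == 2 then t + ((PySem.List.pyGet? vals 0).getD 0) * ((PySem.List.pyGet? vals 1).getD 0) else t)
       else t) 0
     else 0) := by
  rw [phase2 SA NA [] h2]
  by_cases hp1 : (p == 1) = true
  · rw [if_pos hp1, if_pos hp1]
    rw [List.foldl_map]
    simp only [byrowS_getD, anyRows]
    rw [← hmap, List.foldl_map]
    apply PySem.List.foldl_congr_mem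
    intro acc n hn
    have hcond : (SA.any (fun s => decide ((s.row, s.col) ∈ aGetAdj n)))
        = SBl.any (fun s => bAdj s.1 s.2.1 n.row n.col (n.text.length : Int)) := by
      rw [← h1, List.any_map]
      apply PySem.List.any_congr_mem
      intro s _
      apply bool_eq_of_iff
      simp only [Function.comp, projS, decide_eq_true_eq]
      exact mem_aGetAdj n s.row s.col
    simp only [projN]
    rw [h4 n hn, Bool.false_or, hcond]
  · rw [if_neg hp1, if_neg hp1]
    by_cases hp2 : (p == 2) = true
    · rw [if_pos hp2, if_pos hp2]
      rw [List.nil_append, List.foldl_map]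
      simp only [byrowN_getD]
      rw [← h1, List.foldl_map]
      apply PySem.List.foldl_congr_mem
      intro acc s _
      obtain ⟨stext, srow, scol, sadj⟩ := s
      dsimp only [projS]
      have hAvals : ((NB.filter (fun q => bAdj srow scol q.1 q.2.1 q.2.2.1)).map (fun q => q.2.2.2))
          = (NA.filter (fun n => decide ((srow, scol) ∈ aGetAdj n))).map
              (fun n => (PySem.Int.ofChars? n.text).getD 0) := by
        rw [← hmap, List.filter_map, List.map_map]
        have hf : ∀ n ∈ NA, ((fun q => bAdj srow scol q.1 q.2.1 q.2.2.1) ∘ projN) n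
            = (fun n => decide ((srow, scol) ∈ aGetAdj n)) n := by
          intro n _
          apply bool_eq_of_iff
          simp only [Function.comp, projN, decide_eq_true_eq]
          exact (mem_aGetAdj n srow scol).symm
        rw [List.filter_congr hf]
        rfl
      have hperm := valsB_perm NB srow scol
      rw [hAvals] at hperm
      by_cases hstar : (stext == '*') = true
      · simp only [hstar, Bool.true_and]
        split_ifs with hA2 hB2 hB2
        · refine congrArg (fun z => acc + z) ?_
          exact (pair_prod _ (eq_of_beq hA2)).trans
            ((hperm.prod_eq.symm).trans
              (pair_prod _ (hperm.length_eq.trans (eq_of_beq hA2))).symm)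
        · exact absurd (beq_of_eq (hperm.length_eq.trans (eq_of_beq hA2))) hB2
        · exact absurd (beq_of_eq (hperm.length_eq.symm.trans (eq_of_beq hB2))) hA2
        · rfl
      · rw [if_neg (by simp [hstar]), if_neg hstar]
    · rw [if_neg hp2, if_neg hp2]

-- ===== VERDICT (by name: the statement is the Claim_ definition above) =====

theorem solve_spec : Claim_equal_solve := by
  intro data p _
  unfold Spec_solve solve solve_alt
  have hrel0 : StRel 0 0 true ([], [], false, none) (([], [], none) : BSt) :=
    ⟨rfl, by simp, by simp, by simp, by simp, rfl, rfl⟩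
  have hrel := outerFold (PySem.Str.splitlines data) 0 _ _ hrel0
  rcases hA : (PySem.List.enumerate (PySem.Str.splitlines data) 0).foldl aLine ([], [], false, none)
    with ⟨SA, NA, isNA, curA⟩
  rcases hB : (PySem.List.enumerate (PySem.Str.splitlines data) 0).foldl
      (fun st il => ((PySem.List.enumerate il.2.toList 0).map (fun jc => (il.1, jc.1, jc.2))).foldl bStep st)
      (([], [], none) : BSt)
    with ⟨BN, BS, brun⟩
  rw [hA, hB] at hrel
  have hBcells : ((PySem.List.enumerate (PySem.Str.splitlines data) 0).flatMap
      (fun il => (PySem.List.enumerate il.2.toList 0).map (fun jc => (il.1, jc.1, jc.2)))).foldl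
        bStep (([], [], none) : BSt) = (BN, BS, brun) := by
    rw [foldl_flatMap]
    exact hB
  obtain ⟨h1, h2, h3, h4, h5, h6⟩ := hrel
  dsimp only at h1 h2 h4 h6
  simp only [hA, hBcells]
  rcases brun with _ | ⟨r, c0, t⟩
  · exact final_agree p SA NA BS BN h1 h2 h4 h6.2
  · exact final_agree p SA NA BS (bFlush BN (r, c0, t)) h1 h2 h4 h6.2.2.2.2
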